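-- pv_equiv track=rewrite | github.com/edose/mpc | mpc/mp_astrometry.py | chop_html
-- ===== SOURCE A (Python) =====
-- def chop_html(html_lines):
--     """Return list of start and end line numbers defining minor planet blocks of text within html_lines."""
--     # Collect lines numbers for all vertical block delimiters (including end of file):
--     hr_line_numbers = [0]
--     for i_line, line in enumerate(html_lines):
--         if '<hr>' in line:
--             hr_line_numbers.append(i_line)
--     hr_line_numbers.append(len(html_lines) - 1)
--
--     # Make a block if MP data actually between two successive horizontal lines:
--     mp_block_limits = []
--     for i_hr_line in range(len(hr_line_numbers) - 2):
--         for i_line in range(hr_line_numbers[i_hr_line], hr_line_numbers[i_hr_line + 1]):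
--             if html_lines[i_line].strip().lower().startswith('<p>discovery date'):
--                 mp_block_limits.append((hr_line_numbers[i_hr_line], hr_line_numbers[i_hr_line + 1]))
--                 break
--     return mp_block_limits
-- ===== SOURCE B (Python) =====
-- def chop_html(html_lines):
--     """Return list of start and end line numbers defining minor planet blocks of text within html_lines."""
--     # Single streaming pass: each '<hr>' closes the current block; a block is kept
--     # iff a '<p>discovery date' line was seen since the block started.  Nothing is
--     # flushed after the loop, so the trailing segment after the last <hr> is never
--     # emitted (same as the original).
--     blocks = []
--     start = 0
--     found_discovery = False
--     for i, line in enumerate(html_lines):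
--         if '<hr>' in line:
--             if found_discovery:
--                 blocks.append((start, i))
--             start = i
--             found_discovery = False
--         if line.strip().lower().startswith('<p>discovery date'):
--             found_discovery = True
--     return blocks
-- ===== Notes on version B (the rewrite author's own statement) =====
-- stated objective: simpler
-- what changed: Replaced A's two-phase scheme (collect all <hr> line numbers, then re-scan each segment's lines for the discovery marker) by a single streaming pass that keeps a current block start and a found-discovery flag and emits a block at each <hr>.
import Mathlib
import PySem

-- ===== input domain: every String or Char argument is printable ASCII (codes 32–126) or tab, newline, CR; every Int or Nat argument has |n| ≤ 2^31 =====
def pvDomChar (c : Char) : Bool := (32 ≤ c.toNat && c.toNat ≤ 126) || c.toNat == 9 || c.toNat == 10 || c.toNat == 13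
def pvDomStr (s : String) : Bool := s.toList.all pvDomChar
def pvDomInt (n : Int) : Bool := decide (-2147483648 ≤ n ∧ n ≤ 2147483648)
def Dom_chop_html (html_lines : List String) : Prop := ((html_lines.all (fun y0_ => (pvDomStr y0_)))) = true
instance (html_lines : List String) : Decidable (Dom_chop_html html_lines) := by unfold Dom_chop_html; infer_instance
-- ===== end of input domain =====

-- B replaces A's two-phase scheme (collect <hr> positions, then re-scan each segment
-- for the discovery marker) by one streaming pass with a block-start and a flag (objective: simpler).

-- shared line predicates ('<hr>' in line  /  line.strip().lower().startswith('<p>discovery date'))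
def hasHr (line : String) : Bool := PySem.Str.isIn "<hr>" line
def isDisc (line : String) : Bool :=
  PySem.Str.startswith (PySem.Str.lower (PySem.Str.strip line)) "<p>discovery date"

-- ===== PORT A =====
-- hr_line_numbers = [0]; for i,line in enumerate: if '<hr>' in line: append i; append len-1
def hrNumbers (html_lines : List String) : List Int :=
  ((PySem.List.enumerate html_lines).foldl
      (fun acc p => if hasHr p.2 then acc ++ [p.1] else acc) [0])
    ++ [(html_lines.length : Int) - 1]

-- A's inner loop 'for i_line in range(a, b): if <disc line>: append; break' decides exactly
-- whether the scan of [a, b) meets a discovery line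
def check (xs : List String) (a b : Int) : Bool :=
  (PySem.List.pyRange a b 1).any (fun i => isDisc (PySem.List.pyGetD xs i ""))

-- all list indices taken below are provably in range, so pyGetD's default is never used
def chop_html (html_lines : List String) : List (Int × Int) :=
  let hrs := hrNumbers html_lines
  (PySem.List.pyRange 0 ((hrs.length : Int) - 2) 1).foldl
    (fun acc k =>
      if check html_lines (PySem.List.pyGetD hrs k 0) (PySem.List.pyGetD hrs (k + 1) 0)
      then acc ++ [(PySem.List.pyGetD hrs k 0, PySem.List.pyGetD hrs (k + 1) 0)]
      else acc) []

-- ===== PORT B =====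
-- state = (blocks, start, found_discovery); '<hr>' closes the block, then the line may set the flag
def stepB (st : List (Int × Int) × Int × Bool) (p : Int × String) :
    List (Int × Int) × Int × Bool :=
  let st1 := if hasHr p.2 then
               ((if st.2.2 then st.1 ++ [(st.2.1, p.1)] else st.1), p.1, false)
             else st
  (st1.1, st1.2.1, st1.2.2 || isDisc p.2)

def chop_html_alt (html_lines : List String) : List (Int × Int) :=
  ((PySem.List.enumerate html_lines).foldl stepB ([], 0, false)).1

-- ===== PRECONDITION & SPEC =====
def Spec_chop_html (html_lines : List String) (out : List (Int × Int)) : Prop := out = chop_html_alt html_lines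
instance (html_lines : List String) (out : List (Int × Int)) : Decidable (Spec_chop_html html_lines out) := by unfold Spec_chop_html; infer_instance

-- ===== CLAIM (what is proved, stated in full; the proofs are below) =====
def Claim_equal_chop_html : Prop := ∀ (html_lines : List String), Dom_chop_html html_lines → Spec_chop_html html_lines (chop_html html_lines)

-- ===== LEMMAS AND PROOFS =====

-- reference recursion over enumerated lines: B's streaming pass, written structurally
def gseg : List (Int × String) → Int → Bool → List (Int × Int)
  | [], _, _ => []
  | (i, l) :: t, start, found =>
    if hasHr l then (if found then [(start, i)] else []) ++ gseg t i (isDisc l)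
    else gseg t start (found || isDisc l)

-- the <hr> line numbers of xs, counting from s
def hrIdx (xs : List String) (s : Int) : List Int :=
  ((PySem.List.enumerate xs s).filter (fun p => hasHr p.2)).map (fun p => p.1)

theorem foldB (E : List (Int × String)) :
    ∀ (blocks : List (Int × Int)) (start : Int) (found : Bool),
      (E.foldl stepB (blocks, start, found)).1 = blocks ++ gseg E start found := by
  induction E with
  | nil => intro b s f; simp [gseg]
  | cons p t ih =>
    intro b s f
    obtain ⟨i, l⟩ := p
    by_cases h : hasHr l
    · by_cases hf : f
      · simp [List.foldl_cons, stepB, h, hf, gseg, ih]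
      · simp [List.foldl_cons, stepB, h, hf, gseg, ih]
    · simp [List.foldl_cons, stepB, h, gseg, ih]

theorem mapPairs (L : List Int) (e : Int) :
    (PySem.List.pyRange 0 ((L.length : Int) - 1) 1).map
      (fun k => (PySem.List.pyGetD (L ++ [e]) k 0, PySem.List.pyGetD (L ++ [e]) (k + 1) 0))
    = L.zip L.tail := by
  rcases L with _ | ⟨x, t⟩
  · simp [PySem.List.pyRange_one_eq_nil]
  · rw [PySem.List.pyRange_one]
    have hn : (((x :: t).length : Int) - 1 - 0).toNat = t.length := by simp
    rw [hn]
    simp only [List.map_map]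
    apply List.ext_getElem
    · simp
    · intro k h1 h2
      have hk : k < t.length := by simpa using h1
      simp only [List.getElem_map, Function.comp_apply, List.getElem_range]
      have h3 : ((0 : Int) + (k : Int)) = ((k : Nat) : Int) := by ring
      rw [h3]
      have h4 : ((k : Int) + 1) = ((k + 1 : Nat) : Int) := by push_cast; ring
      conv_lhs => rw [h4]
      simp only [PySem.List.pyGetD_natCast]
      have e1 : ((x :: t) ++ [e]).getD k 0 = (x :: t)[k]'(by simp; omega) := by
        rw [List.getD_eq_getElem _ _ (by simp; omega)]
        exact List.getElem_append_left (by simp; omega)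
      have e2 : ((x :: t) ++ [e]).getD (k+1) 0 = (x :: t)[k+1]'(by simp; omega) := by
        rw [List.getD_eq_getElem _ _ (by simp; omega)]
        exact List.getElem_append_left (by simp; omega)
      rw [e1, e2]
      simp [List.getElem_zip]

theorem rangePairs (xs : List String) (L : List Int) (e : Int) :
    (PySem.List.pyRange 0 (((L ++ [e]).length : Int) - 2) 1).foldl
      (fun acc k =>
        if check xs (PySem.List.pyGetD (L ++ [e]) k 0) (PySem.List.pyGetD (L ++ [e]) (k + 1) 0)
        then acc ++ [(PySem.List.pyGetD (L ++ [e]) k 0, PySem.List.pyGetD (L ++ [e]) (k + 1) 0)]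
        else acc) []
    = (L.zip L.tail).filter (fun p => check xs p.1 p.2) := by
  have hlen : (((L ++ [e]).length : Int) - 2) = ((L.length : Int) - 1) := by
    simp; omega
  rw [hlen,
    PySem.List.foldl_append_if
      (p := fun k => check xs (PySem.List.pyGetD (L ++ [e]) k 0) (PySem.List.pyGetD (L ++ [e]) (k + 1) 0))
      (f := fun k => (PySem.List.pyGetD (L ++ [e]) k 0, PySem.List.pyGetD (L ++ [e]) (k + 1) 0))]
  rw [show (fun k => check xs (PySem.List.pyGetD (L ++ [e]) k 0) (PySem.List.pyGetD (L ++ [e]) (k + 1) 0))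
        = (fun p => check xs p.1 p.2) ∘ (fun k => (PySem.List.pyGetD (L ++ [e]) k 0, PySem.List.pyGetD (L ++ [e]) (k + 1) 0)) from rfl]
  rw [← List.filter_map, mapPairs]
  simp

theorem mainLemma (xs : List String) :
    ∀ (t : List String) (k : Nat) (start : Int) (found : Bool),
      t = xs.drop k → 0 ≤ start → start ≤ (k : Int) → found = check xs start (k : Int) →
      gseg (PySem.List.enumerate t (k : Int)) start found
        = ((start :: hrIdx t (k : Int)).zip (hrIdx t (k : Int))).filter
            (fun p => check xs p.1 p.2) := by
  intro t
  induction t with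
  | nil => intro k start found _ _ _ _; simp [gseg, hrIdx, PySem.List.enumerate_nil]
  | cons l t' ih =>
    intro k start found ht h0 hsk hf
    have hk : k < xs.length := by
      by_contra h
      rw [List.drop_eq_nil_of_le (by omega)] at ht
      simp at ht
    have hxl : xs[k]? = some l := by
      have h2 : (xs.drop k)[0]? = xs[k + 0]? := List.getElem?_drop
      rw [← ht] at h2
      simpa using h2.symm
    have hgd : PySem.List.pyGetD xs (k : Int) "" = l := by
      rw [PySem.List.pyGetD_natCast, List.getD_eq_getElem?_getD, hxl]
      rfl
    have ht' : t' = xs.drop (k + 1) := by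
      have h2 : (xs.drop k).tail = xs.drop (k + 1) := List.tail_drop
      rw [← ht] at h2
      simpa using h2
    have hcast : (k : Int) + 1 = ((k + 1 : Nat) : Int) := by push_cast; ring
    rw [PySem.List.enumerate_cons]
    by_cases hh : hasHr l
    · have hd : isDisc l = check xs ((k : Nat) : Int) ((k + 1 : Nat) : Int) := by
        rw [check, ← hcast, PySem.List.pyRange_one_singleton]
        simp [hgd]
      have hIH := ih (k + 1) ((k : Nat) : Int) (isDisc l) ht' (by positivity) (by push_cast; omega) hd
      simp only [gseg, hh, if_true, PySem.List.enumerate_cons, hcast, hIH, hrIdx,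
        List.filter_cons, List.map_cons, List.zip_cons_cons]
      rw [← hf]
      cases found <;> simp
    · have hd : (found || isDisc l) = check xs start ((k + 1 : Nat) : Int) := by
        rw [hf]
        simp only [check]
        rw [← hcast, PySem.List.pyRange_one_succ_right hsk]
        simp [List.any_append, hgd]
      have hIH := ih (k + 1) start (found || isDisc l) ht' h0 (by push_cast; omega) hd
      simp only [Bool.not_eq_true] at hh
      simp only [gseg, hh, if_false, PySem.List.enumerate_cons, hcast, hIH, hrIdx,
        List.filter_cons, Bool.false_eq_true]

theorem A_char (xs : List String) :
    chop_html xs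
      = (((0 : Int) :: hrIdx xs 0).zip (hrIdx xs 0)).filter (fun p => check xs p.1 p.2) := by
  show (PySem.List.pyRange 0 (((hrNumbers xs).length : Int) - 2) 1).foldl _ [] = _
  have hL : hrNumbers xs = ((0 : Int) :: hrIdx xs 0) ++ [(xs.length : Int) - 1] := by
    unfold hrNumbers hrIdx
    rw [PySem.List.foldl_append_if (p := fun p : Int × String => hasHr p.2) (f := fun p : Int × String => p.1)]
    simp
  rw [hL]
  exact rangePairs xs ((0 : Int) :: hrIdx xs 0) ((xs.length : Int) - 1)

theorem B_char (xs : List String) :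
    chop_html_alt xs = gseg (PySem.List.enumerate xs 0) 0 false := by
  unfold chop_html_alt
  rw [foldB]
  simp

-- ===== VERDICT (by name: the statement is the Claim_ definition above) =====
theorem chop_html_spec : Claim_equal_chop_html := by
  intro xs _
  show chop_html xs = chop_html_alt xs
  rw [A_char, B_char]
  have h := mainLemma xs xs 0 0 false (by simp) le_rfl (by simp)
    (by rw [check, Nat.cast_zero, PySem.List.pyRange_one_eq_nil le_rfl]; simp)
  rw [Nat.cast_zero] at h
  rw [h]
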